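-- pv_equiv track=rewrite | github.com/Emilka1604/QueuingSystem | QueuingSystem.py | _from_10_to_3
-- ===== SOURCE A (Python) =====
-- def _from_10_to_3(num_):
--     num = num_
--     new_num = ''
--     while num > 0:
--         new_num = str(num % 3) + new_num
--         num //= 3
--     while len(new_num) < 3:
--         new_num = "0"+new_num
--     return [int(ch) for ch in list(new_num)]
-- ===== SOURCE B (Python) =====
-- def _from_10_to_3(num_):
--     if num_ <= 0:
--         return [0, 0, 0]
--     # count the base-3 digits of num_: smallest length with 3**length > num_
--     length = 0
--     p = 1
--     while p <= num_:
--         p *= 3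
--         length += 1
--     length = max(length, 3)
--     # extract digits positionally, most significant first
--     return [(num_ // 3 ** i) % 3 for i in range(length - 1, -1, -1)]
-- ===== Notes on version B (the rewrite author's own statement) =====
-- stated objective: alternative
-- what changed: Replaces LSB-first repeated division with string prepending and a string pad loop by first computing the digit count (smallest L with 3**L > num, padded to at least 3) and then extracting each digit MSB-first by positional power division, never building a string.
import Mathlib
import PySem

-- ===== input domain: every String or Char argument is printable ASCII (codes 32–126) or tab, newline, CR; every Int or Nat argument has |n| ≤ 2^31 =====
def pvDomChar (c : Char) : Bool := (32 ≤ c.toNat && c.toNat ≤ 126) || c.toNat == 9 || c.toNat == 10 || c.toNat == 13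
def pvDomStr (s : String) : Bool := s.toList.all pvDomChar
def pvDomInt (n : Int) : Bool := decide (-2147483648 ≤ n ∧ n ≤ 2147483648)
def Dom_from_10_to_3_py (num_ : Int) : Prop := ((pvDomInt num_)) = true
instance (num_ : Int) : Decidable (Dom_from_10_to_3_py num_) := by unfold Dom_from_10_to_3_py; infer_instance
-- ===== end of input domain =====

-- B replaces A's LSB-first division loop with string prepending/padding by a digit count
-- followed by MSB-first positional power extraction (objective: alternative decomposition).

-- ===== PORT A =====
-- int(ch) for a single char; in A ch is always a digit, so the default 0 is never used
def pvChInt (ch : Char) : Int := (PySem.Int.ofChars? [ch]).getD 0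

-- while num > 0: new_num = str(num % 3) + new_num; num //= 3   (new_num as List Char)
def pvALoop (num : Int) (new_num : List Char) : List Char :=
  if _h : 0 < num then
    pvALoop (PySem.Int.floordiv num 3) (PySem.Int.toChars (PySem.Int.mod num 3) ++ new_num)
  else new_num
termination_by num.toNat
decreasing_by
  rw [PySem.Int.floordiv_eq_ediv_of_pos (by norm_num)]
  omega

-- while len(new_num) < 3: new_num = "0" + new_num
def pvAPad (new_num : List Char) : List Char :=
  if new_num.length < 3 then pvAPad ('0' :: new_num) else new_num
termination_by 3 - new_num.length

def from_10_to_3_py (num_ : Int) : List Int :=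
  (pvAPad (pvALoop num_ [])).map pvChInt

-- ===== PORT B =====
-- while p <= num_: p *= 3; length += 1   (the proof argument 0 < p only justifies termination)
def pvBCount (num_ p L : Int) (hp : 0 < p) : Int :=
  if h : p ≤ num_ then pvBCount num_ (p * 3) (L + 1) (by omega) else L
termination_by (num_ + 1 - p).toNat
decreasing_by omega

def from_10_to_3_py_alt (num_ : Int) : List Int :=
  if num_ ≤ 0 then [0, 0, 0]
  else
    let L := max (pvBCount num_ 1 0 (by norm_num)) 3
    -- i ranges over L-1 .. 0, all nonnegative, so 3 ** i is 3 ^ i.toNat exactly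
    (PySem.List.pyRange (L - 1) (-1) (-1)).map
      (fun i => PySem.Int.mod (PySem.Int.floordiv num_ (3 ^ i.toNat)) 3)

-- ===== PRECONDITION & SPEC =====
def Spec_from_10_to_3_py (num_ : Int) (out : List Int) : Prop := out = from_10_to_3_py_alt num_
instance (num_ : Int) (out : List Int) : Decidable (Spec_from_10_to_3_py num_ out) := by unfold Spec_from_10_to_3_py; infer_instance

-- ===== CLAIM (what is proved, stated in full; the proofs are below) =====
def Claim_equal_from_10_to_3_py : Prop := ∀ (num_ : Int), Dom_from_10_to_3_py num_ → Spec_from_10_to_3_py num_ (from_10_to_3_py num_)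

-- ===== LEMMAS AND PROOFS =====

-- reference: base-3 digits of a natural number, most significant first ([] for 0)
def pvDigs (n : Nat) : List Int :=
  if _h : n = 0 then [] else pvDigs (n / 3) ++ [((n % 3 : Nat) : Int)]
decreasing_by omega

theorem pvDigs_zero : pvDigs 0 = [] := by simp [pvDigs]

theorem pvDigs_pos {n : Nat} (h : n ≠ 0) :
    pvDigs n = pvDigs (n / 3) ++ [((n % 3 : Nat) : Int)] := by
  rw [pvDigs]; simp [h]

-- n < 3 ^ (number of digits of n)
theorem pvDigs_lt (n : Nat) : n < 3 ^ (pvDigs n).length := by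
  induction n using Nat.strong_induction_on with
  | _ n ih =>
    by_cases h : n = 0
    · simp [h, pvDigs_zero]
    · rw [pvDigs_pos h]
      have ih3 := ih (n / 3) (by omega)
      simp only [List.length_append, List.length_singleton, pow_succ]
      omega

-- sharp: if n < 3 ^ L then n has at most L digits
theorem pvDigs_len_le (L : Nat) : ∀ n : Nat, n < 3 ^ L → (pvDigs n).length ≤ L := by
  induction L with
  | zero => intro n hn; interval_cases n; simp [pvDigs_zero]
  | succ L ih =>
    intro n hn
    by_cases h : n = 0
    · simp [h, pvDigs_zero]
    · rw [pvDigs_pos h]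
      have : n / 3 < 3 ^ L := by
        rw [Nat.div_lt_iff_lt_mul (by norm_num)]
        calc n < 3 ^ (L + 1) := hn
          _ = 3 ^ L * 3 := by ring
      have := ih (n / 3) this
      simp
      omega

-- A's division loop, mapped through int(ch), produces the digit list
theorem pvALoop_map (n : Nat) : ∀ s : List Char,
    (pvALoop (n : Int) s).map pvChInt = pvDigs n ++ s.map pvChInt := by
  induction n using Nat.strong_induction_on with
  | _ n ih =>
    intro s
    by_cases h : n = 0
    · subst h
      rw [pvALoop]
      simp [pvDigs_zero]
    · have hpos : (0:Int) < (n:Int) := by exact_mod_cast Nat.pos_of_ne_zero h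
      rw [pvALoop]
      simp only [hpos, dif_pos]
      have hdiv : PySem.Int.floordiv (n : Int) 3 = ((n / 3 : Nat) : Int) := by
        rw [PySem.Int.floordiv_eq_ediv_of_pos (by norm_num)]; omega
      have hmod : PySem.Int.mod (n : Int) 3 = ((n % 3 : Nat) : Int) := by
        rw [PySem.Int.mod_eq_emod_of_pos (by norm_num)]; omega
      rw [hdiv, hmod, ih (n / 3) (by omega), pvDigs_pos h]
      rw [List.map_append]
      have hch : List.map pvChInt (PySem.Int.toChars ((n % 3 : Nat) : Int)) = [((n % 3 : Nat) : Int)] := by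
        have h3 : n % 3 = 0 ∨ n % 3 = 1 ∨ n % 3 = 2 := by omega
        rcases h3 with h3 | h3 | h3 <;> rw [h3] <;> decide
      rw [hch]
      simp

-- A's padding loop prepends zeros up to length 3
theorem pvAPad_eq_aux : ∀ (k : Nat) (s : List Char), 3 - s.length = k →
    pvAPad s = List.replicate (3 - s.length) '0' ++ s := by
  intro k
  induction k with
  | zero =>
    intro s h
    rw [pvAPad]
    have h3 : ¬ s.length < 3 := by omega
    simp [h3, (by omega : 3 - s.length = 0)]
  | succ k ih =>
    intro s h
    rw [pvAPad]
    have hlt : s.length < 3 := by omega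
    simp only [hlt, if_pos]
    rw [ih ('0' :: s) (by simp; omega)]
    have he : 3 - s.length = (3 - ('0' :: s).length) + 1 := by simp; omega
    rw [he, List.replicate_succ']
    simp

theorem pvAPad_eq (s : List Char) :
    pvAPad s = List.replicate (3 - s.length) '0' ++ s :=
  pvAPad_eq_aux (3 - s.length) s rfl

-- A's value, characterised: zero-padded MSB-first digits of num_.toNat
theorem from_10_to_3_py_eq (num_ : Int) (h : 0 ≤ num_) :
    from_10_to_3_py num_ =
      List.replicate (3 - (pvDigs num_.toNat).length) 0 ++ pvDigs num_.toNat := by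
  unfold from_10_to_3_py
  have hcast : ((num_.toNat : Nat) : Int) = num_ := Int.toNat_of_nonneg h
  have hloop := pvALoop_map num_.toNat []
  rw [hcast] at hloop
  rw [pvAPad_eq, List.map_append, hloop]
  have hlen : (pvALoop num_ []).length = (pvDigs num_.toNat).length := by
    have := congrArg List.length hloop
    simpa using this
  simp [hlen, List.map_replicate, show pvChInt '0' = (0:Int) from by decide]

-- B's counting loop computes the digit count
theorem pvBCount_eq (m : Nat) : ∀ (n k : Nat) (L : Int) (p : Int) (hp : 0 < p),
    p = (3 : Int) ^ k → n / 3 ^ k = m →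
    pvBCount (n : Int) p L hp = L + ((pvDigs (n / 3 ^ k)).length : Int) := by
  induction m using Nat.strong_induction_on with
  | _ m ih =>
    intro n k L p hp hpk hm
    rw [pvBCount]
    by_cases h : p ≤ (n : Int)
    · simp only [h, dif_pos]
      have hk : 3 ^ k ≤ n := by
        have : ((3 ^ k : Nat) : Int) ≤ (n : Int) := by push_cast; rw [← hpk] at *; exact_mod_cast h
        exact_mod_cast this
      have hm1 : 1 ≤ m := by
        have h0 : 0 < 3 ^ k := by positivity
        have := (Nat.one_le_div_iff h0).mpr hk
        omega
      have hstep : n / 3 ^ (k + 1) = m / 3 := by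
        rw [pow_succ, ← Nat.div_div_eq_div_mul, hm]
      rw [ih (m / 3) (by omega) n (k + 1) (L + 1) (p * 3) (by positivity)
        (by rw [hpk]; ring) hstep, hstep, hm, pvDigs_pos (by omega : m ≠ 0)]
      simp
      omega
    · simp only [h, dif_neg, not_false_iff]
      have hk : ¬ 3 ^ k ≤ n := by
        intro hc
        apply h
        rw [hpk]
        exact_mod_cast hc
      have h0 : n / 3 ^ k = 0 := Nat.div_eq_of_lt (by omega)
      rw [h0, pvDigs_zero]
      simp

-- positional extraction, Nat form: range-indexed power division yields padded digits
theorem pvExt (L : Nat) : ∀ n : Nat, n < 3 ^ L →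
    (List.range L).map (fun j => ((n / 3 ^ (L - 1 - j) % 3 : Nat) : Int)) =
      List.replicate (L - (pvDigs n).length) 0 ++ pvDigs n := by
  induction L with
  | zero =>
    intro n hn
    interval_cases n
    simp [pvDigs_zero]
  | succ L ih =>
    intro n hn
    rw [List.range_succ, List.map_append]
    have hre : (List.range L).map (fun j => ((n / 3 ^ (L + 1 - 1 - j) % 3 : Nat) : Int)) =
        (List.range L).map (fun j => ((n / 3 / 3 ^ (L - 1 - j) % 3 : Nat) : Int)) := by
      apply List.map_congr_left
      intro j hj
      rw [List.mem_range] at hj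
      have he : L + 1 - 1 - j = (L - 1 - j) + 1 := by omega
      rw [he, pow_succ, Nat.mul_comm, ← Nat.div_div_eq_div_mul]
    have hdiv : n / 3 < 3 ^ L := by
      rw [Nat.div_lt_iff_lt_mul (by norm_num)]
      calc n < 3 ^ (L + 1) := hn
        _ = 3 ^ L * 3 := by ring
    rw [hre, ih (n / 3) hdiv]
    by_cases h : n = 0
    · subst h
      simp [pvDigs_zero, List.replicate_succ' (n := L)]
    · rw [pvDigs_pos h]
      have hlen : (pvDigs (n / 3)).length ≤ L := pvDigs_len_le L (n / 3) hdiv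
      simp only [List.length_append, List.length_singleton]
      have hLr : L + 1 - ((pvDigs (n / 3)).length + 1) = L - (pvDigs (n / 3)).length := by omega
      rw [hLr, List.append_assoc]
      congr 1
      congr 1
      simp [pow_zero]

-- Nat.max distributes into the replicate padding: pad-to-3 equals max-with-3 length
theorem pvMaxSub (a : Nat) : max a 3 - a = 3 - a := by omega

-- ===== VERDICT (by name: the statement is the Claim_ definition above) =====
theorem from_10_to_3_py_spec : Claim_equal_from_10_to_3_py := by
  intro num_ _
  unfold Spec_from_10_to_3_py from_10_to_3_py_alt
  by_cases hle : num_ ≤ 0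
  · simp only [hle, if_pos]
    unfold from_10_to_3_py
    rw [pvALoop, dif_neg (by omega : ¬ (0:Int) < num_), pvAPad_eq]
    decide
  · simp only [hle, if_neg, not_false_iff]
    set n := num_.toNat with hn
    have hcastn : ((n : Nat) : Int) = num_ := Int.toNat_of_nonneg (by omega)
    have hn0 : n ≠ 0 := by omega
    -- A's side
    rw [from_10_to_3_py_eq num_ (by omega)]
    -- B's counting loop
    have hcnt : pvBCount num_ 1 0 (by norm_num) = ((pvDigs n).length : Int) := by
      have h := pvBCount_eq (n / 3 ^ 0) n 0 0 1 (by norm_num) (by norm_num) rfl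
      rw [hcastn] at h
      simp only [pow_zero, Nat.div_one] at h
      rw [h]
      simp
    rw [hcnt]
    set d := (pvDigs n).length with hd
    set M := max d 3 with hM
    have hM3 : 3 ≤ M := Nat.le_max_right d 3
    have hLM : max ((d : Nat) : Int) 3 = ((M : Nat) : Int) := by
      simp only [hM]; omega
    rw [hLM]
    rw [PySem.List.pyRange_neg_one]
    have hT : (((M : Int) - 1) - (-1)).toNat = M := by omega
    rw [hT, List.map_map]
    have hnlt : n < 3 ^ M := by
      calc n < 3 ^ d := pvDigs_lt n
        _ ≤ 3 ^ M := Nat.pow_le_pow_right (by norm_num) (by omega)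
    have hmap : (List.range M).map
        ((fun i => PySem.Int.mod (PySem.Int.floordiv num_ (3 ^ i.toNat)) 3) ∘
          (fun k : Nat => (M : Int) - 1 - (k : Int))) =
        (List.range M).map (fun j => ((n / 3 ^ (M - 1 - j) % 3 : Nat) : Int)) := by
      apply List.map_congr_left
      intro j hj
      rw [List.mem_range] at hj
      simp only [Function.comp]
      have he : ((M : Int) - 1 - (j : Int)).toNat = M - 1 - j := by omega
      rw [he]
      have hp3 : ((3 : Int) ^ (M - 1 - j)) = (((3 ^ (M - 1 - j) : Nat)) : Int) := by
        push_cast; ring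
      rw [hp3, ← hcastn, PySem.Int.floordiv_natCast]
      rw [PySem.Int.mod_eq_emod_of_pos (by norm_num)]
      omega
    rw [hmap, pvExt M n hnlt, pvMaxSub d]
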